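-- pv_equiv track=rewrite | github.com/ulelab/ultraplex | v6.py | make_all_seqs
-- ===== SOURCE A (Python) =====
-- def make_all_seqs(l):
-- 	"""
-- 	Makes all possible sequences, including Ns, of length l
-- 	"""
-- 	nts = ['A', "C", "G", "T", "N"]
--
-- 	all_seqs = nts
--
-- 	for i in range(l-1):
-- 		new_seqs = []
-- 		for seq in all_seqs:
-- 			for nt in nts:
-- 				new_seqs.append(seq + nt)
-- 		all_seqs = new_seqs
--
-- 	return(all_seqs)
-- ===== SOURCE B (Python) =====
-- def make_all_seqs(l):
--     """
--     Makes all possible sequences, including Ns, of length l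
--     """
--     nts = ['A', "C", "G", "T", "N"]
--     if l <= 1:
--         return nts
--     return [seq + nt for seq in make_all_seqs(l - 1) for nt in nts]
-- ===== Notes on version B (the rewrite author's own statement) =====
-- stated objective: simpler
-- what changed: Replaced the accumulating loop that rebuilds the whole list each round with a direct recursion on the length: the base case returns the five single nucleotides and the step appends each nucleotide to every shorter sequence.
import Mathlib
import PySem

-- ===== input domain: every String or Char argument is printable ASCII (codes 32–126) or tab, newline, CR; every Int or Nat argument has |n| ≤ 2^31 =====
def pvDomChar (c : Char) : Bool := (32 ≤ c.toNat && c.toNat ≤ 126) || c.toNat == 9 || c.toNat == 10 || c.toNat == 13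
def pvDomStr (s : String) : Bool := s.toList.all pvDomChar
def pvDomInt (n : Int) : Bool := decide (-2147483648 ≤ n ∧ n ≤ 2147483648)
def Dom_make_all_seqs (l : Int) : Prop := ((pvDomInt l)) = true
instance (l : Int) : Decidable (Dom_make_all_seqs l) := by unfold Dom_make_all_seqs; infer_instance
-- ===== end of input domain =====

-- B re-expresses A's accumulating loop as a direct recursion on the length (simpler decomposition; same cost).


-- ===== PORT A =====
def pvNts : List String := ["A", "C", "G", "T", "N"]

def make_all_seqs (l : Int) : List String :=
  (PySem.List.pyRange 0 (l - 1) 1).foldl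
    (fun all_seqs _ =>
      all_seqs.foldl
        (fun new_seqs seq =>
          pvNts.foldl (fun ns nt => ns ++ [seq ++ nt]) new_seqs)
        [])
    pvNts

-- ===== PORT B =====
def make_all_seqs_alt (l : Int) : List String :=
  if l ≤ 1 then pvNts
  else (make_all_seqs_alt (l - 1)).flatMap (fun seq => pvNts.map (fun nt => seq ++ nt))
termination_by l.toNat
decreasing_by
  rename_i h
  omega

-- ===== PRECONDITION & SPEC =====
def Spec_make_all_seqs (l : Int) (out : List String) : Prop := out = make_all_seqs_alt l
instance (l : Int) (out : List String) : Decidable (Spec_make_all_seqs l out) := by unfold Spec_make_all_seqs; infer_instance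

-- ===== CLAIM (what is proved, stated in full; the proofs are below) =====
def Claim_equal_make_all_seqs : Prop := ∀ (l : Int), Dom_make_all_seqs l → Spec_make_all_seqs l (make_all_seqs l)

-- ===== LEMMAS AND PROOFS =====

-- one round of A's loop
def pvStep (xs : List String) : List String :=
  xs.flatMap (fun seq => pvNts.map (fun nt => seq ++ nt))

-- the inner double foldl of A is pvStep
theorem pv_inner_eq (xs : List String) :
    xs.foldl
      (fun new_seqs seq => pvNts.foldl (fun ns nt => ns ++ [seq ++ nt]) new_seqs) [] = pvStep xs := by
  have h : ∀ (xs : List String) (acc : List String),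
      xs.foldl (fun new_seqs seq => pvNts.foldl (fun ns nt => ns ++ [seq ++ nt]) new_seqs) acc
        = acc ++ pvStep xs := by
    intro xs
    induction xs with
    | nil => intro acc; simp [pvStep]
    | cons s t ih =>
      intro acc
      simp only [List.foldl_cons, ih]
      simp [pvStep, pvNts]
  simpa using h xs []

-- a foldl that ignores the list elements is an iterate of the body
theorem pv_foldl_const {α β : Type} (f : α → α) (xs : List β) (init : α) :
    xs.foldl (fun a _ => f a) init = f^[xs.length] init := by
  induction xs generalizing init with
  | nil => rfl
  | cons x t ih => simp [List.foldl_cons, ih, Function.iterate_succ_apply]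

theorem pv_A_eq (l : Int) : make_all_seqs l = pvStep^[(l - 1).toNat] pvNts := by
  unfold make_all_seqs
  calc (PySem.List.pyRange 0 (l - 1) 1).foldl
        (fun all_seqs _ =>
          all_seqs.foldl
            (fun new_seqs seq => pvNts.foldl (fun ns nt => ns ++ [seq ++ nt]) new_seqs) []) pvNts
      = (PySem.List.pyRange 0 (l - 1) 1).foldl (fun a _ => pvStep a) pvNts := by
        rw [show (fun (all_seqs : List String) (_ : Int) =>
            all_seqs.foldl
              (fun new_seqs seq => pvNts.foldl (fun ns nt => ns ++ [seq ++ nt]) new_seqs)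
              ([] : List String)) = (fun a _ => pvStep a) from
          funext fun a => funext fun _ => pv_inner_eq a]
    _ = pvStep^[(PySem.List.pyRange 0 (l - 1) 1).length] pvNts := pv_foldl_const _ _ _
    _ = pvStep^[(l - 1).toNat] pvNts := by
        rw [PySem.List.length_pyRange_one]
        norm_num

theorem pv_B_eq (l : Int) : make_all_seqs_alt l = pvStep^[(l - 1).toNat] pvNts := by
  by_cases h : l ≤ 1
  · rw [make_all_seqs_alt, if_pos h]
    have : (l - 1).toNat = 0 := by omega
    rw [this]; rfl
  · have hk : (l - 1).toNat = (l - 1 - 1).toNat + 1 := by omega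
    rw [make_all_seqs_alt, if_neg h, pv_B_eq (l - 1), hk,
      Function.iterate_succ_apply']
    rfl
termination_by l.toNat
decreasing_by omega

-- ===== VERDICT (by name: the statement is the Claim_ definition above) =====
theorem make_all_seqs_spec : Claim_equal_make_all_seqs := by
  intro l _
  unfold Spec_make_all_seqs
  rw [pv_A_eq, pv_B_eq]
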